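-- pv_equiv track=rewrite | github.com/kwakminoo/AI-Guitar-Tab | backend/app/services/pipeline.py | _timed_lyrics_to_plain
-- ===== SOURCE A (Python) =====
-- from typing import Any, Callable
--
-- def _timed_lyrics_to_plain(timed: list[dict[str, Any]]) -> str:
--     lines: list[str] = []
--     prev = ""
--     for item in timed:
--         text = str(item.get("line", "")).strip()
--         if not text or text == prev:
--             continue
--         lines.append(text)
--         prev = text
--     return "\n".join(lines).strip()
-- ===== SOURCE B (Python) =====
-- def _timed_lyrics_to_plain(timed: list[dict[str, object]]) -> str:
--     def solve(seg):
--         if len(seg) <= 1: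
--             if not seg:
--                 return []
--             t = str(seg[0].get("line", "")).strip()
--             return [t] if t else []
--         mid = len(seg) // 2
--         left = solve(seg[:mid])
--         right = solve(seg[mid:])
--         if left and right and right[0] == left[-1]:
--             right = right[1:]
--         return left + right
--     return "\n".join(solve(timed)).strip()
-- ===== Notes on version B (the rewrite author's own statement) =====
-- stated objective: alternative
-- what changed: Replaces A's single fused left-to-right loop with a prev tracker by a divide-and-conquer recursion: each half is reduced to its deduplicated non-empty stripped lines independently, and the halves are merged by dropping the right half's head when it equals the left half's last line.
import Mathlib
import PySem

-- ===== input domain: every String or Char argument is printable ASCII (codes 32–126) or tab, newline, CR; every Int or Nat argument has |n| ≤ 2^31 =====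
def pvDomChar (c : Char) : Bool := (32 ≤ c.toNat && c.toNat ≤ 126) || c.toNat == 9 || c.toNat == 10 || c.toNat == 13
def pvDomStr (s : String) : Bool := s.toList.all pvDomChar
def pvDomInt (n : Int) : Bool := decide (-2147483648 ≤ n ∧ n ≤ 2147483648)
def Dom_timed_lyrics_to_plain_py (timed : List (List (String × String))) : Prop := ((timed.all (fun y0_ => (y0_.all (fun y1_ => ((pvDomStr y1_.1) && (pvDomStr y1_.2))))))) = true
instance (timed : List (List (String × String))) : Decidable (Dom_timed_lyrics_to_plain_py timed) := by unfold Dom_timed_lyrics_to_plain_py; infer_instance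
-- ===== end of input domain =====

-- B replaces A's fused prev-tracking loop by a divide-and-conquer recursion that dedups
-- each half independently and merges at the boundary; alternative decomposition, same result.

-- shared per-item expression: str(item.get("line", "")).strip()
def pvLine (item : List (String × String)) : String :=
  PySem.Str.strip (PySem.Dict.getD (PySem.Dict.mk item) "line" "")

-- ===== PORT A =====
def pvStepA (st : List String × String) (item : List (String × String)) : List String × String :=
  let text := pvLine item
  if text = "" ∨ text = st.2 then st else (st.1 ++ [text], text)

def timed_lyrics_to_plain_py (timed : List (List (String × String))) : String :=
  PySem.Str.strip (PySem.Str.join "\n" (timed.foldl pvStepA ([], "")).1)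

-- ===== PORT B =====
-- merge step: if left and right and right[0] == left[-1]: right = right[1:]; left + right
def pvMerge (L R : List String) : List String :=
  match L.getLast?, R with
  | some l, r :: rest => if r = l then L ++ rest else L ++ R
  | _, _ => L ++ R

def pvSolve (seg : List (List (String × String))) : List String :=
  if h : seg.length ≤ 1 then
    match seg with
    | [] => []
    | item :: _ => let t := pvLine item; if t = "" then [] else [t]
  else
    pvMerge (pvSolve (seg.take (seg.length / 2))) (pvSolve (seg.drop (seg.length / 2)))
termination_by seg.length
decreasing_by
  · simp only [List.length_take]; omega
  · simp only [List.length_drop]; omega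

def timed_lyrics_to_plain_py_alt (timed : List (List (String × String))) : String :=
  PySem.Str.strip (PySem.Str.join "\n" (pvSolve timed))

-- ===== PRECONDITION & SPEC =====
def Spec_timed_lyrics_to_plain_py (timed : List (List (String × String))) (out : String) : Prop := out = timed_lyrics_to_plain_py_alt timed
instance (timed : List (List (String × String))) (out : String) : Decidable (Spec_timed_lyrics_to_plain_py timed out) := by unfold Spec_timed_lyrics_to_plain_py; infer_instance

-- ===== CLAIM (what is proved, stated in full; the proofs are below) =====
def Claim_equal_timed_lyrics_to_plain_py : Prop := ∀ (timed : List (List (String × String))), Dom_timed_lyrics_to_plain_py timed → Spec_timed_lyrics_to_plain_py timed (timed_lyrics_to_plain_py timed)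

-- ===== LEMMAS AND PROOFS =====

-- consecutive dedup with previous element p / of a whole list
def pvGo (p : String) : List String → List String
  | [] => []
  | x :: xs => if x = p then pvGo p xs else x :: pvGo x xs

def pvDD : List String → List String
  | [] => []
  | x :: xs => x :: pvGo x xs

def pvFiltered (seg : List (List (String × String))) : List String :=
  (seg.map pvLine).filter (fun t => decide (t ≠ ""))

-- last element of l, with default p (Python's running "previous" value)
def pvLast (l : List String) (p : String) : String :=
  match l with
  | [] => p
  | x :: xs => pvLast xs x

theorem last?_cons (l : List String) : ∀ a, (a :: l).getLast? = some (pvLast l a) := by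
  induction l with
  | nil => intro a; rfl
  | cons x xs ih => intro a; rw [List.getLast?_cons_cons, ih x]; rfl

theorem go_append (xs ys : List String) :
    ∀ p, pvGo p (xs ++ ys) = pvGo p xs ++ pvGo (pvLast (pvGo p xs) p) ys := by
  induction xs with
  | nil => intro p; simp [pvGo, pvLast]
  | cons x xs ih =>
    intro p
    by_cases hx : x = p
    · simp only [List.cons_append, pvGo, if_pos hx, ih p]
    · simp only [List.cons_append, pvGo, if_neg hx, ih x]
      rfl

theorem go_dd (p : String) (bs : List String) :
    pvGo p bs = (match pvDD bs with
                 | [] => []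
                 | r :: rest => if r = p then rest else r :: rest) := by
  cases bs with
  | nil => rfl
  | cons b bs =>
    simp only [pvDD, pvGo]
    by_cases hb : b = p
    · subst hb; simp
    · simp [hb]

theorem dd_append (as bs : List String) :
    pvDD (as ++ bs) = pvMerge (pvDD as) (pvDD bs) := by
  cases as with
  | nil =>
    simp [pvDD, pvMerge]
  | cons a as =>
    show a :: pvGo a (as ++ bs) = pvMerge (a :: pvGo a as) (pvDD bs)
    rw [go_append]
    cases hb : pvDD bs with
    | nil =>
      have hgq : pvGo (pvLast (pvGo a as) a) bs = [] := by rw [go_dd, hb]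
      rw [hgq]
      simp [pvMerge, last?_cons]
    | cons r rest =>
      have hgq : pvGo (pvLast (pvGo a as) a) bs
          = if r = pvLast (pvGo a as) a then rest else r :: rest := by rw [go_dd, hb]
      rw [hgq]
      by_cases hr : r = pvLast (pvGo a as) a <;> simp [pvMerge, last?_cons, hr]

theorem filtered_ne (seg : List (List (String × String))) :
    ∀ y ∈ pvFiltered seg, y ≠ "" := by
  intro y hy
  simpa using (List.of_mem_filter hy)

theorem solve_eq (n : Nat) : ∀ (seg : List (List (String × String))), seg.length ≤ n →
    pvSolve seg = pvDD (pvFiltered seg) := by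
  induction n with
  | zero =>
    intro seg h
    have : seg = [] := List.eq_nil_of_length_eq_zero (Nat.le_zero.mp h)
    subst this; simp [pvSolve, pvFiltered, pvDD]
  | succ n ih =>
    intro seg h
    by_cases h1 : seg.length ≤ 1
    · match seg with
      | [] => simp [pvSolve, pvFiltered, pvDD]
      | [item] =>
        rw [pvSolve]
        simp only [dif_pos h1]
        by_cases ht : pvLine item = ""
        · simp [ht, pvFiltered, pvDD]
        · simp [ht, pvFiltered, pvDD, pvGo]
    · rw [pvSolve, dif_neg h1]
      have hmid : seg.length / 2 < seg.length ∧ 1 ≤ seg.length / 2 := by omega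
      have htk : (seg.take (seg.length / 2)).length ≤ n := by
        simp only [List.length_take]; omega
      have hdp : (seg.drop (seg.length / 2)).length ≤ n := by
        simp only [List.length_drop]; omega
      rw [ih _ htk, ih _ hdp, ← dd_append]
      have : pvFiltered (seg.take (seg.length / 2)) ++ pvFiltered (seg.drop (seg.length / 2))
           = pvFiltered seg := by
        simp [pvFiltered, ← List.filter_append]
      rw [this]

theorem loop_eq (l : List (List (String × String))) :
    ∀ (acc : List String) (prev : String),
      (l.foldl pvStepA (acc, prev)).1 = acc ++ pvGo prev (pvFiltered l) := by
  induction l with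
  | nil => intro acc prev; simp [pvFiltered, pvGo]
  | cons item rest ih =>
    intro acc prev
    simp only [List.foldl_cons, pvFiltered, List.map_cons, List.filter_cons, pvStepA]
    by_cases h0 : pvLine item = ""
    · simp [h0, ih, pvFiltered]
    · by_cases hp : pvLine item = prev
      · have : pvLine item = "" ∨ pvLine item = prev := Or.inr hp
        have hpne : prev ≠ "" := hp ▸ h0
        rw [if_pos this, ih]
        simp [pvFiltered, hp, hpne, pvGo]
      · have : ¬ (pvLine item = "" ∨ pvLine item = prev) := by tauto
        rw [if_neg this]
        simp only [h0, decide_true, ne_eq, not_false_eq_true, if_pos]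
        rw [ih]
        simp [pvGo, hp, pvFiltered, List.append_assoc]

theorem go_empty (ys : List String) (h : ∀ y ∈ ys, y ≠ "") :
    pvGo "" ys = pvDD ys := by
  cases ys with
  | nil => rfl
  | cons y ys =>
    have hy : y ≠ "" := h y (by simp)
    simp [pvGo, pvDD, hy]

-- ===== VERDICT (by name: the statement is the Claim_ definition above) =====
theorem timed_lyrics_to_plain_py_spec : Claim_equal_timed_lyrics_to_plain_py := by
  intro timed _
  unfold Spec_timed_lyrics_to_plain_py timed_lyrics_to_plain_py timed_lyrics_to_plain_py_alt
  rw [loop_eq timed [] "", go_empty _ (filtered_ne timed),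
      ← solve_eq timed.length timed (le_refl _)]
  rfl
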